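-- pv_equiv track=rewrite | github.com/DozeDuck/streamlit-gmx-plot | streamlit-gmxtoolbox.py | consist
-- ===== SOURCE A (Python) =====
-- def consist(x_values):
--     seq1 = [x_values[0]]
--     seq2 = []
--     # seq3 = []
--     for i in range(1, len(x_values)):
--         # find the break point
--         if x_values[i] <= x_values[i-1]+2 and seq2 == []:
--             seq1.append(x_values[i])
--         else:
--             seq2.append(x_values[i])
--     return seq1, seq2
-- ===== SOURCE B (Python) =====
-- def consist(x_values):
--     x = list(x_values)
--     b = next((i for i in range(1, len(x)) if x[i] > x[i - 1] + 2), len(x))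
--     return x[:b], x[b:]
-- ===== Notes on version B (the rewrite author's own statement) =====
-- stated objective: simpler
-- what changed: Instead of accumulating two lists in a stateful loop keyed on seq2's emptiness, B computes the first break index with a single scan and returns the two slices of the input at that index.
-- outside the precondition, e.g. on consist([]): A raises IndexError, B returns ([], [])
import Mathlib
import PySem

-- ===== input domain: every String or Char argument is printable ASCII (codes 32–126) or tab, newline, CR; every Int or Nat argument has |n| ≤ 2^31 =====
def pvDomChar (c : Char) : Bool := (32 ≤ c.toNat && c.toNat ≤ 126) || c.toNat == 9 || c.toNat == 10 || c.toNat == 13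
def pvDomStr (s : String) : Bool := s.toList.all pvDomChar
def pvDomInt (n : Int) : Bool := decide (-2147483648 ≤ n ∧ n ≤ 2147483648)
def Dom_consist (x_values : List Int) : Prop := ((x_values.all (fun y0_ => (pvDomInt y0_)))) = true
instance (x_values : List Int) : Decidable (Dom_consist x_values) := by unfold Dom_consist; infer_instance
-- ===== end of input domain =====

-- B computes the first break index with one scan and returns the two slices there,
-- instead of A's stateful loop growing two accumulator lists (objective: simpler).
-- (On the empty list A raises IndexError, excluded by Pre_consist; B there returns ([], []).)

-- ===== PORT A =====
-- literal transliteration: seq1 starts as the singleton of the first element (pyGetD; the empty list,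
-- where Python raises IndexError, is excluded by Pre_consist), then the indexed loop.
def consist (x_values : List Int) : List Int × List Int :=
  (PySem.List.pyRange 1 (PySem.List.len x_values) 1).foldl
    (fun (s : List Int × List Int) (i : Int) =>
      if PySem.List.pyGetD x_values i 0 ≤ PySem.List.pyGetD x_values (i - 1) 0 + 2 ∧ s.2 = [] then
        (s.1 ++ [PySem.List.pyGetD x_values i 0], s.2)
      else
        (s.1, s.2 ++ [PySem.List.pyGetD x_values i 0]))
    ([PySem.List.pyGetD x_values 0 0], [])

-- ===== PORT B =====
-- scan of adjacent pairs: first index i ≥ 1 with x[i] > x[i-1] + 2, default len(x)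
def gapIdx (prev : Int) : List Int → Nat → Nat
  | [], n => n
  | y :: ys, n => if y > prev + 2 then n else gapIdx y ys (n + 1)

def consist_alt (x_values : List Int) : List Int × List Int :=
  let b : Nat := match x_values with
    | [] => 0
    | h :: t => gapIdx h t 1
  (x_values.take b, x_values.drop b)

-- ===== PRECONDITION & SPEC =====
-- Python A indexes the first element unconditionally, so it raises IndexError on the empty list
def Pre_consist (x_values : List Int) : Prop := x_values ≠ []
instance (x_values : List Int) : Decidable (Pre_consist x_values) := by unfold Pre_consist; infer_instance
def pvWitness_consist : List Int := [1, 2, 6]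

def Spec_consist (x_values : List Int) (out : List Int × List Int) : Prop := out = consist_alt x_values
instance (x_values : List Int) (out : List Int × List Int) : Decidable (Spec_consist x_values out) := by unfold Spec_consist; infer_instance

-- ===== CLAIM (what is proved, stated in full; the proofs are below) =====
def Claim_equal_consist : Prop := ∀ (x_values : List Int), Dom_consist x_values → Pre_consist x_values → Spec_consist x_values (consist x_values)

-- ===== LEMMAS AND PROOFS =====

-- the step function of A's loop, for a fixed input list
def stepA (x : List Int) (s : List Int × List Int) (i : Int) : List Int × List Int :=
  if PySem.List.pyGetD x i 0 ≤ PySem.List.pyGetD x (i - 1) 0 + 2 ∧ s.2 = [] then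
    (s.1 ++ [PySem.List.pyGetD x i 0], s.2)
  else
    (s.1, s.2 ++ [PySem.List.pyGetD x i 0])

-- phase 2: once seq2 is non-empty, the rest of the loop appends everything to seq2
lemma phase2 (x : List Int) : ∀ (t : List Int) (i : Nat), x.drop i = t → i ≤ x.length →
    ∀ (s1 s2 : List Int), s2 ≠ [] →
    (PySem.List.pyRange (i : Int) (x.length : Int) 1).foldl (stepA x) (s1, s2) = (s1, s2 ++ t) := by
  intro t
  induction t with
  | nil =>
    intro i hd hlen s1 s2 hs2
    have hi : i = x.length := by
      have := List.drop_eq_nil_iff.mp hd; omega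
    subst hi
    rw [PySem.List.pyRange_one_eq_nil (by omega)]
    simp
  | cons y ys ih =>
    intro i hd hlen s1 s2 hs2
    have hi : i < x.length := by
      by_contra h
      rw [List.drop_eq_nil_of_le (by omega)] at hd; simp at hd
    have hy : x[i]? = some y := by
      have h0 : (x.drop i)[0]? = some y := by rw [hd]; rfl
      simpa using h0
    have hyv : PySem.List.pyGetD x (i : Int) 0 = y := by
      rw [PySem.List.pyGetD_natCast, List.getD_eq_getElem?_getD, hy]; rfl
    rw [PySem.List.pyRange_one_cons (by exact_mod_cast hi)]
    simp only [List.foldl_cons]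
    have hstep : stepA x (s1, s2) (i : Int) = (s1, s2 ++ [y]) := by
      simp [stepA, hs2, hyv]
    rw [hstep]
    have hd' : x.drop (i + 1) = ys := by
      have := congrArg (List.drop 1) hd
      simpa [List.drop_drop, Nat.add_comm] using this
    have := ih (i + 1) hd' (by omega) s1 (s2 ++ [y]) (by simp)
    push_cast at this ⊢
    rw [this]
    simp

-- phase 1: while seq2 is empty, seq1 is a prefix of x; the loop splits x at gapIdx
lemma phase1 (x : List Int) : ∀ (t : List Int) (i : Nat), 1 ≤ i → x.drop i = t → i ≤ x.length →
    ∀ (prev : Int), x[i - 1]? = some prev →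
    (PySem.List.pyRange (i : Int) (x.length : Int) 1).foldl (stepA x) (x.take i, []) =
      (x.take (gapIdx prev t i), x.drop (gapIdx prev t i)) := by
  intro t
  induction t with
  | nil =>
    intro i h1 hd hlen prev hprev
    have hi : i = x.length := by
      have := List.drop_eq_nil_iff.mp hd; omega
    subst hi
    rw [PySem.List.pyRange_one_eq_nil (by omega)]
    simp [gapIdx]
  | cons y ys ih =>
    intro i h1 hd hlen prev hprev
    have hi : i < x.length := by
      by_contra h
      rw [List.drop_eq_nil_of_le (by omega)] at hd; simp at hd
    have hy : x[i]? = some y := by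
      have h0 : (x.drop i)[0]? = some y := by rw [hd]; rfl
      simpa using h0
    have hyv : PySem.List.pyGetD x (i : Int) 0 = y := by
      rw [PySem.List.pyGetD_natCast, List.getD_eq_getElem?_getD, hy]; rfl
    have hpv : PySem.List.pyGetD x ((i : Int) - 1) 0 = prev := by
      have hcast : (i : Int) - 1 = ((i - 1 : Nat) : Int) := by omega
      rw [hcast, PySem.List.pyGetD_natCast, List.getD_eq_getElem?_getD, hprev]; rfl
    have hd' : x.drop (i + 1) = ys := by
      have := congrArg (List.drop 1) hd
      simpa [List.drop_drop, Nat.add_comm] using this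
    rw [PySem.List.pyRange_one_cons (by exact_mod_cast hi)]
    simp only [List.foldl_cons]
    by_cases hc : y ≤ prev + 2
    · have hstep : stepA x (x.take i, []) (i : Int) = (x.take (i + 1), []) := by
        simp [stepA, hyv, hpv, hc, List.take_add_one, hy]
      rw [hstep]
      have hg : gapIdx prev (y :: ys) i = gapIdx y ys (i + 1) := by
        simp [gapIdx]; omega
      rw [hg]
      have hy' : x[(i + 1) - 1]? = some y := by simpa using hy
      have := ih (i + 1) (by omega) hd' (by omega) y hy'
      push_cast at this ⊢
      exact this
    · have hstep : stepA x (x.take i, []) (i : Int) = (x.take i, [y]) := by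
        simp [stepA, hyv, hpv, hc]
      rw [hstep]
      have hg : gapIdx prev (y :: ys) i = i := by
        simp [gapIdx]; omega
      rw [hg]
      have := phase2 x ys (i + 1) hd' (by omega) (x.take i) [y] (by simp)
      push_cast at this ⊢
      rw [this, hd]; simp

-- ===== VERDICT (by name: the statement is the Claim_ definition above) =====
theorem consist_spec : Claim_equal_consist := by
  intro x hdom hpre
  unfold Spec_consist
  match x, hpre with
  | h :: t, _ =>
    have h0 : PySem.List.pyGetD (h :: t) (0 : Int) 0 = h := by simp [PySem.List.pyGetD_ofNat']
    have hinit : ([PySem.List.pyGetD (h :: t) (0 : Int) 0], ([] : List Int)) = ((h :: t).take 1, []) := by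
      simp [h0]
    have hmain := phase1 (h :: t) t 1 (by omega) (by simp) (by simp) h (by rfl)
    show (PySem.List.pyRange 1 (PySem.List.len (h :: t)) 1).foldl (stepA (h :: t))
        ([PySem.List.pyGetD (h :: t) (0 : Int) 0], []) = consist_alt (h :: t)
    rw [hinit, PySem.List.len_eq]
    simp only [List.length_cons] at hmain ⊢
    rw [show ((1:Nat):Int) = (1:Int) from rfl] at hmain
    rw [hmain]
    simp [consist_alt]
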